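-- pv_equiv track=rewrite | github.com/rhinosaur0/HackerRank-Practice | abbreviation.py | abbreviation
-- ===== SOURCE A (Python) =====
-- def abbreviation(a, b):
--     dp = [[1] + [0] * len(b) for i in range(len(a) + 1)]
--     for i in range(1, len(a) + 1):
--         for j in range(1, len(b) + 1):
--             if a[i - 1] == b[j - 1]:
--                 dp[i][j] = dp[i-1][j-1]
--             elif a[i - 1] == b[j-1].lower():
--                 dp[i][j] = max(dp[i-1][j-1], dp[i-1][j])
--             elif a[i-1].isupper():
--                 dp[i][j] = 0
--             else:
--                 dp[i][j] = dp[i-1][j]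
--
--     return 'YES' if dp[len(a)][len(b)] else "NO"
-- ===== SOURCE B (Python) =====
-- def abbreviation(a, b):
--     # Top-down demand-driven evaluation of the same recurrence: an explicit
--     # postorder DFS stack with a memo dict computes only the states that
--     # (len(a), len(b)) actually depends on, instead of filling the whole table.
--     memo = {}
--     stack = [(len(a), len(b), False)]
--     while stack:
--         i, j, expanded = stack.pop()
--         if (i, j) in memo:
--             continue
--         if j == 0:
--             memo[(i, j)] = 1
--         elif i == 0:
--             memo[(i, j)] = 0
--         elif a[i - 1] == b[j - 1]:
--             if expanded:
--                 memo[(i, j)] = memo[(i - 1, j - 1)]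
--             else:
--                 stack.append((i, j, True))
--                 stack.append((i - 1, j - 1, False))
--         elif a[i - 1] == b[j - 1].lower():
--             if expanded:
--                 memo[(i, j)] = max(memo[(i - 1, j - 1)], memo[(i - 1, j)])
--             else:
--                 stack.append((i, j, True))
--                 stack.append((i - 1, j - 1, False))
--                 stack.append((i - 1, j, False))
--         elif a[i - 1].isupper():
--             memo[(i, j)] = 0
--         else:
--             if expanded:
--                 memo[(i, j)] = memo[(i - 1, j)]
--             else:
--                 stack.append((i, j, True))
--                 stack.append((i - 1, j, False))
--     return 'YES' if memo[(len(a), len(b))] else 'NO'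
-- ===== Notes on version B (the rewrite author's own statement) =====
-- stated objective: faster
-- what changed: Replaces A's bottom-up fill of the whole (len(a)+1)x(len(b)+1) table with a top-down demand-driven evaluation: an explicit postorder-DFS stack plus a memo dict computes only the states the goal state (len(a),len(b)) actually depends on.
import Mathlib
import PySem

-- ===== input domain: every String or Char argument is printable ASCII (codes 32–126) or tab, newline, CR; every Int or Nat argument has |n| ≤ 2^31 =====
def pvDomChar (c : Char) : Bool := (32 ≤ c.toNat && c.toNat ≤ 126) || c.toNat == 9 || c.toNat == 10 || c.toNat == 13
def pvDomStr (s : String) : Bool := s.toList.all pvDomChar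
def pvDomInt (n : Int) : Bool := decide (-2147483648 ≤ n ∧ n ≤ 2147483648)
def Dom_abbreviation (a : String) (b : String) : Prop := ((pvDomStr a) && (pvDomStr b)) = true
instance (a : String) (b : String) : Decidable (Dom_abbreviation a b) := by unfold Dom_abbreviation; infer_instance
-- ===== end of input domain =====

-- B replaces A's bottom-up full-table DP with a top-down demand-driven evaluation of the
-- same recurrence: an explicit postorder-DFS stack plus a memo dict computes only the
-- states (len(a), len(b)) actually depends on.

-- ===== PORT A =====
-- 1-char .lower() / .isupper() are PySem.Chars.lowerChar / .isupper (exact on the ASCII domain)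
def abbreviation (a : String) (b : String) : String :=
  let al := a.toList
  let bl := b.toList
  let dp : List (List Int) :=
    (PySem.List.pyRange 0 ((al.length : Int) + 1) 1).map
      (fun _ => 1 :: List.replicate bl.length (0 : Int))
  let dp :=
    (PySem.List.pyRange 1 ((al.length : Int) + 1) 1).foldl (fun dp i =>
      (PySem.List.pyRange 1 ((bl.length : Int) + 1) 1).foldl (fun dp j =>
        let ai := PySem.List.pyGetD al (i - 1) ' '
        let bj := PySem.List.pyGetD bl (j - 1) ' '
        let v : Int :=
          if ai == bj then
            PySem.List.pyGetD (PySem.List.pyGetD dp (i - 1) []) (j - 1) 0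
          else if ai == PySem.Chars.lowerChar bj then
            max (PySem.List.pyGetD (PySem.List.pyGetD dp (i - 1) []) (j - 1) 0)
                (PySem.List.pyGetD (PySem.List.pyGetD dp (i - 1) []) j 0)
          else if PySem.Chars.isupper ai then 0
          else PySem.List.pyGetD (PySem.List.pyGetD dp (i - 1) []) j 0
        PySem.List.pySetD dp i (PySem.List.pySetD (PySem.List.pyGetD dp i []) j v))
        dp) dp
  if PySem.List.pyGetD (PySem.List.pyGetD dp (al.length : Int) []) (bl.length : Int) 0 ≠ 0
  then "YES" else "NO"

-- ===== PORT B =====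
-- weight of a stack frame / of the whole stack: the termination measure of Source B's while loop
def pvT (i : Nat) : Nat := 2 * 3 ^ i
def pvPhi (S : List ((Nat × Nat) × Bool)) : Nat :=
  (S.map (fun f => if f.2 then 1 else pvT f.1.1)).sum

theorem pvPhi_cons (f : (Nat × Nat) × Bool) (S : List ((Nat × Nat) × Bool)) :
    pvPhi (f :: S) = (if f.2 then 1 else pvT f.1.1) + pvPhi S := by
  simp [pvPhi]

theorem pvT_pos (i : Nat) : 1 ≤ pvT i := by
  have : 1 ≤ 3 ^ i := Nat.one_le_pow _ _ (by norm_num)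
  simp [pvT]; omega

theorem pvT_push (i : Nat) (h : i ≠ 0) : 2 * pvT (i - 1) + 1 < pvT i := by
  obtain ⟨i', rfl⟩ : ∃ i', i = i' + 1 := ⟨i - 1, by omega⟩
  have h3 : 1 ≤ 3 ^ i' := Nat.one_le_pow _ _ (by norm_num)
  simp only [pvT, Nat.add_sub_cancel, pow_succ]
  omega

-- Source B's while loop: stack top at the list head; memo is the Python dict.
-- memo[child] lookups in the expanded branches use getD 0: the key is provably
-- present there (lemma pvRun_main below), so this is exact for Source B (which would
-- raise KeyError only if the key were absent).
def pvRun (al bl : List Char) :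
    List ((Nat × Nat) × Bool) → PySem.Dict (Nat × Nat) Int → PySem.Dict (Nat × Nat) Int
  | [], μ => μ
  | (⟨(i, j), e⟩ :: rest), μ =>
    if PySem.Dict.contains μ (i, j) then pvRun al bl rest μ
    else if _hj : j = 0 then pvRun al bl rest (μ.insert (i, j) 1)
    else if _hi : i = 0 then pvRun al bl rest (μ.insert (i, j) 0)
    else if al.getD (i - 1) ' ' == bl.getD (j - 1) ' ' then
      if _he : e then pvRun al bl rest (μ.insert (i, j) (μ.getD (i - 1, j - 1) 0))
      else pvRun al bl (((i - 1, j - 1), false) :: ((i, j), true) :: rest) μ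
    else if al.getD (i - 1) ' ' == PySem.Chars.lowerChar (bl.getD (j - 1) ' ') then
      if _he : e then
        pvRun al bl rest
          (μ.insert (i, j) (max (μ.getD (i - 1, j - 1) 0) (μ.getD (i - 1, j) 0)))
      else
        pvRun al bl
          (((i - 1, j), false) :: ((i - 1, j - 1), false) :: ((i, j), true) :: rest) μ
    else if PySem.Chars.isupper (al.getD (i - 1) ' ') then
      pvRun al bl rest (μ.insert (i, j) 0)
    else
      if _he : e then pvRun al bl rest (μ.insert (i, j) (μ.getD (i - 1, j) 0))
      else pvRun al bl (((i - 1, j), false) :: ((i, j), true) :: rest) μ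
termination_by S _ => pvPhi S
decreasing_by
  all_goals simp only [pvPhi_cons]
  all_goals try (rw [Bool.not_eq_true] at _he; subst _he)
  all_goals norm_num
  all_goals first
    | (have := pvT_pos i; split <;> omega)
    | (have := pvT_pos i; omega)
    | (have h1 := pvT_push i (by assumption); have h2 := pvT_pos (i - 1); omega)

-- a[i-1]/b[j-1] accesses use List.getD: indices are in range on every state the
-- machine reaches (i ≤ len(a), j ≤ len(b), and i,j ≥ 1 in those branches), so this is exact.
def abbreviation_alt (a : String) (b : String) : String :=
  let al := a.toList
  let bl := b.toList
  let memo := pvRun al bl [((al.length, bl.length), false)] PySem.Dict.empty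
  if memo.getD (al.length, bl.length) 0 ≠ 0 then "YES" else "NO"

-- ===== PRECONDITION & SPEC =====
def Spec_abbreviation (a : String) (b : String) (out : String) : Prop := out = abbreviation_alt a b
instance (a : String) (b : String) (out : String) : Decidable (Spec_abbreviation a b out) := by unfold Spec_abbreviation; infer_instance

-- ===== CLAIM (what is proved, stated in full; the proofs are below) =====
def Claim_equal_abbreviation : Prop := ∀ (a : String) (b : String), Dom_abbreviation a b → Spec_abbreviation a b (abbreviation a b)

-- ===== LEMMAS AND PROOFS =====

-- the recurrence both programs compute, as a function of (i, j)
def pvVal (al bl : List Char) : Nat → Nat → Int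
  | 0, j => if j = 0 then 1 else 0
  | (i + 1), j =>
    if j = 0 then 1
    else
      let ai := al.getD i ' '
      let bj := bl.getD (j - 1) ' '
      if ai == bj then pvVal al bl i (j - 1)
      else if ai == PySem.Chars.lowerChar bj then
        max (pvVal al bl i (j - 1)) (pvVal al bl i j)
      else if PySem.Chars.isupper ai then 0
      else pvVal al bl i j

-- the dependencies of state (i, j), mirroring pvRun's branches
def pvKids (al bl : List Char) (i j : Nat) : List (Nat × Nat) :=
  if j = 0 then [] else if i = 0 then []
  else if al.getD (i - 1) ' ' == bl.getD (j - 1) ' ' then [(i - 1, j - 1)]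
  else if al.getD (i - 1) ' ' == PySem.Chars.lowerChar (bl.getD (j - 1) ' ') then
    [(i - 1, j - 1), (i - 1, j)]
  else if PySem.Chars.isupper (al.getD (i - 1) ' ') then []
  else [(i - 1, j)]

def pvMemoOK (al bl : List Char) (μ : PySem.Dict (Nat × Nat) Int) : Prop :=
  ∀ p v, μ.get? p = some v → v = pvVal al bl p.1 p.2

-- every expanded frame's dependencies are among the keys below it (accumulated in ks)
def pvCover (al bl : List Char) : List ((Nat × Nat) × Bool) → List (Nat × Nat) → Prop
  | [], _ => True
  | (⟨(i, j), e⟩ :: rest), ks =>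
    (e = true → ∀ c ∈ pvKids al bl i j, c ∈ ks) ∧ pvCover al bl rest ((i, j) :: ks)

theorem pvIsSome_iff_mem_keys {ν : Type} (d : PySem.Dict (Nat × Nat) ν) (p : Nat × Nat) :
    (d.get? p).isSome ↔ p ∈ d.keys := by
  rw [← PySem.Dict.contains_iff_mem_keys, Option.isSome_iff_ne_none]
  constructor
  · intro h; by_contra hc
    simp only [Bool.not_eq_true] at hc
    exact h ((PySem.Dict.get?_eq_none_iff_contains _ _).mpr hc)
  · intro h hn
    rw [PySem.Dict.get?_eq_none_iff_contains] at hn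
    simp [hn] at h

theorem pvGetD_of_mem (al bl : List Char) (μ : PySem.Dict (Nat × Nat) Int) (p : Nat × Nat)
    (hok : pvMemoOK al bl μ) (h : p ∈ μ.keys) : μ.getD p 0 = pvVal al bl p.1 p.2 := by
  obtain ⟨v, hv⟩ := Option.isSome_iff_exists.mp ((pvIsSome_iff_mem_keys μ p).mpr h)
  rw [show μ.getD p 0 = v from by simp [PySem.Dict.getD, hv], hok p v hv]

theorem pvCover_mono (al bl : List Char) :
    ∀ (S : List ((Nat × Nat) × Bool)) (ks ks' : List (Nat × Nat)),
      pvCover al bl S ks → (∀ x ∈ ks, x ∈ ks') → pvCover al bl S ks' := by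
  intro S
  induction S with
  | nil => intro ks ks' _ _; trivial
  | cons f rest ih =>
    rcases f with ⟨⟨i, j⟩, e⟩
    intro ks ks' h hsub
    refine ⟨fun he c hc => hsub _ (h.1 he c hc), ih _ _ h.2 ?_⟩
    intro x hx
    rcases List.mem_cons.mp hx with rfl | hx
    · exact List.mem_cons_self ..
    · exact List.mem_cons_of_mem _ (hsub _ hx)

theorem pvMemoOK_insert (al bl : List Char) (μ : PySem.Dict (Nat × Nat) Int) (i j : Nat)
    (v : Int) (hok : pvMemoOK al bl μ) (hv : v = pvVal al bl i j) :
    pvMemoOK al bl (μ.insert (i, j) v) := by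
  intro p w h
  by_cases hp : p = (i, j)
  · subst hp
    rw [PySem.Dict.get?_insert_self] at h
    cases h; exact hv
  · rw [PySem.Dict.get?_insert_of_ne _ _ hp] at h
    exact hok p w h

theorem pvVal_j_zero (al bl : List Char) (i : Nat) : pvVal al bl i 0 = 1 := by
  cases i <;> simp [pvVal]

theorem pvPhi_lt_cons (f : (Nat × Nat) × Bool) (S : List ((Nat × Nat) × Bool)) :
    pvPhi S < pvPhi (f :: S) := by
  rw [pvPhi_cons]
  have := pvT_pos f.1.1
  split <;> omega

theorem pvPhi_push1 (i j j' : Nat) (rest : List ((Nat × Nat) × Bool)) (hi : i ≠ 0) :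
    pvPhi (((i - 1, j'), false) :: ((i, j), true) :: rest) < pvPhi (((i, j), false) :: rest) := by
  simp only [pvPhi_cons]
  have h1 := pvT_push i hi
  simp
  omega

theorem pvPhi_push2 (i j : Nat) (rest : List ((Nat × Nat) × Bool)) (hi : i ≠ 0) :
    pvPhi (((i - 1, j), false) :: ((i - 1, j - 1), false) :: ((i, j), true) :: rest)
      < pvPhi (((i, j), false) :: rest) := by
  simp only [pvPhi_cons]
  have h1 := pvT_push i hi
  simp
  omega

theorem pvRun_main (al bl : List Char) : ∀ n S μ, pvPhi S = n →
    pvMemoOK al bl μ → pvCover al bl S μ.keys →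
    pvMemoOK al bl (pvRun al bl S μ) ∧
    (∀ f ∈ S, f.1 ∈ (pvRun al bl S μ).keys) ∧
    (∀ p ∈ μ.keys, p ∈ (pvRun al bl S μ).keys) := by
  intro n
  induction n using Nat.strong_induction_on with
  | _ n IH =>
  intro S μ hn hok hcov
  match S with
  | [] =>
    rw [pvRun]
    exact ⟨hok, by simp, fun p hp => hp⟩
  | (⟨(i, j), e⟩ :: rest) =>
    rw [pvRun]
    subst hn
    rcases hcov with ⟨hckids, hcrest⟩
    by_cases hhit : PySem.Dict.contains μ (i, j)
    · -- memo hit: pop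
      rw [if_pos hhit]
      have hmem : (i, j) ∈ μ.keys := (PySem.Dict.contains_iff_mem_keys _ _).mp hhit
      have hcov' : pvCover al bl rest μ.keys :=
        pvCover_mono al bl rest _ _ hcrest (by
          intro x hx; rcases List.mem_cons.mp hx with rfl | hx; exacts [hmem, hx])
      obtain ⟨c1, c2, c3⟩ := IH _ (pvPhi_lt_cons _ _) rest μ rfl hok hcov'
      refine ⟨c1, ?_, c3⟩
      intro f hf
      rcases List.mem_cons.mp hf with rfl | hf
      · exact c3 _ hmem
      · exact c2 f hf
    · rw [if_neg hhit]
      -- helper facts for all insert cases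
      have ins : ∀ v : Int, v = pvVal al bl i j →
          pvMemoOK al bl ((μ.insert (i, j) v)) ∧
          (∀ x ∈ μ.keys, x ∈ (μ.insert (i, j) v).keys) ∧ (i, j) ∈ (μ.insert (i, j) v).keys := by
        intro v hv
        refine ⟨pvMemoOK_insert al bl μ i j v hok hv, ?_, ?_⟩
        · intro x hx; exact (PySem.Dict.mem_keys_insert _ _ _ _).mpr (Or.inr hx)
        · exact (PySem.Dict.mem_keys_insert _ _ _ _).mpr (Or.inl rfl)
      have pop : ∀ v : Int, v = pvVal al bl i j →
          pvMemoOK al bl (pvRun al bl rest (μ.insert (i, j) v)) ∧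
          (∀ f ∈ (⟨(i, j), e⟩ :: rest : List ((Nat × Nat) × Bool)),
            f.1 ∈ (pvRun al bl rest (μ.insert (i, j) v)).keys) ∧
          (∀ p ∈ μ.keys, p ∈ (pvRun al bl rest (μ.insert (i, j) v)).keys) := by
        intro v hv
        obtain ⟨k1, k2, k3⟩ := ins v hv
        have hcov' : pvCover al bl rest (μ.insert (i, j) v).keys :=
          pvCover_mono al bl rest _ _ hcrest (by
            intro x hx; rcases List.mem_cons.mp hx with rfl | hx; exacts [k3, k2 x hx])
        obtain ⟨c1, c2, c3⟩ := IH _ (pvPhi_lt_cons _ _) rest _ rfl k1 hcov'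
        refine ⟨c1, ?_, fun p hp => c3 p (k2 p hp)⟩
        intro f hf
        rcases List.mem_cons.mp hf with rfl | hf
        · exact c3 _ k3
        · exact c2 f hf
      by_cases hj : j = 0
      · rw [dif_pos hj]
        exact pop 1 (by rw [hj, pvVal_j_zero])
      · rw [dif_neg hj]
        by_cases hi : i = 0
        · rw [dif_pos hi]
          exact pop 0 (by subst hi; simp [pvVal, hj])
        · rw [dif_neg hi]
          obtain ⟨i', rfl⟩ : ∃ i'', i = i'' + 1 := ⟨i - 1, by omega⟩
          obtain ⟨j', rfl⟩ : ∃ j'', j = j'' + 1 := ⟨j - 1, by omega⟩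
          simp only [Nat.add_sub_cancel]
          have kidval : e = true → ∀ c ∈ pvKids al bl (i' + 1) (j' + 1),
              μ.getD c 0 = pvVal al bl c.1 c.2 := by
            intro he c hc
            exact pvGetD_of_mem al bl μ c hok (hckids he c hc)
          have hkids0 : pvKids al bl (i' + 1) (j' + 1) =
              (if al.getD i' ' ' == bl.getD j' ' ' then [(i', j')]
               else if al.getD i' ' ' == PySem.Chars.lowerChar (bl.getD j' ' ') then
                 [(i', j'), (i', j' + 1)]
               else if PySem.Chars.isupper (al.getD i' ' ') then [] else [(i', j' + 1)]) := by
            unfold pvKids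
            rw [if_neg (Nat.succ_ne_zero j'), if_neg (Nat.succ_ne_zero i')]
            simp only [Nat.add_sub_cancel]
          have hval0 : pvVal al bl (i' + 1) (j' + 1) =
              (if al.getD i' ' ' == bl.getD j' ' ' then pvVal al bl i' j'
               else if al.getD i' ' ' == PySem.Chars.lowerChar (bl.getD j' ' ') then
                 max (pvVal al bl i' j') (pvVal al bl i' (j' + 1))
               else if PySem.Chars.isupper (al.getD i' ' ') then 0
               else pvVal al bl i' (j' + 1)) := by
            show (if j' + 1 = 0 then (1 : Int) else _) = _
            rw [if_neg (Nat.succ_ne_zero j')]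
            simp only [Nat.add_sub_cancel]
          by_cases heq : al.getD i' ' ' == bl.getD j' ' '
          · rw [if_pos heq]
            rw [if_pos heq] at hkids0 hval0
            by_cases he : e
            · rw [dif_pos he]
              refine pop _ ?_
              rw [kidval he (i', j') (by rw [hkids0]; simp), hval0]
            · rw [dif_neg he]
              have he' : e = false := by simpa using he
              subst he'
              have hcovS' : pvCover al bl
                  (((i', j'), false) :: ((i' + 1, j' + 1), true) :: rest) μ.keys := by
                refine ⟨by simp, ?_, ?_⟩
                · intro _ c hc
                  rw [hkids0] at hc
                  rcases List.mem_singleton.mp hc with rfl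
                  exact List.mem_cons_self ..
                · exact pvCover_mono al bl rest _ _ hcrest (by
                    intro x hx
                    rcases List.mem_cons.mp hx with rfl | hx
                    · exact List.mem_cons_self ..
                    · exact List.mem_cons_of_mem _ (List.mem_cons_of_mem _ hx))
              obtain ⟨c1, c2, c3⟩ := IH _ (pvPhi_push1 (i' + 1) (j' + 1) j' rest (Nat.succ_ne_zero i')) _ μ rfl hok hcovS'
              refine ⟨c1, ?_, c3⟩
              intro f hf
              rcases List.mem_cons.mp hf with rfl | hf
              · exact c2 ⟨(i' + 1, j' + 1), true⟩ (by simp)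
              · exact c2 f (by simp [hf])
          · rw [if_neg heq]
            rw [if_neg heq] at hkids0 hval0
            by_cases hlow : al.getD i' ' ' == PySem.Chars.lowerChar (bl.getD j' ' ')
            · rw [if_pos hlow]
              rw [if_pos hlow] at hkids0 hval0
              by_cases he : e
              · rw [dif_pos he]
                refine pop _ ?_
                rw [kidval he (i', j') (by rw [hkids0]; simp),
                  kidval he (i', j' + 1) (by rw [hkids0]; simp), hval0]
              · rw [dif_neg he]
                have he' : e = false := by simpa using he
                subst he'
                have hcovS' : pvCover al bl
                    (((i', j' + 1), false) :: ((i', j'), false)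
                      :: ((i' + 1, j' + 1), true) :: rest) μ.keys := by
                  refine ⟨by simp, by simp, ?_, ?_⟩
                  · intro _ c hc
                    rw [hkids0] at hc
                    rcases List.mem_cons.mp hc with rfl | hc
                    · exact List.mem_cons_self ..
                    · rcases List.mem_singleton.mp hc with rfl
                      exact List.mem_cons_of_mem _ (List.mem_cons_self ..)
                  · exact pvCover_mono al bl rest _ _ hcrest (by
                      intro x hx
                      rcases List.mem_cons.mp hx with rfl | hx
                      · exact List.mem_cons_self ..
                      · exact List.mem_cons_of_mem _ (List.mem_cons_of_mem _
                          (List.mem_cons_of_mem _ hx)))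
                obtain ⟨c1, c2, c3⟩ := IH _ (pvPhi_push2 (i' + 1) (j' + 1) rest (Nat.succ_ne_zero i')) _ μ rfl hok hcovS'
                refine ⟨c1, ?_, c3⟩
                intro f hf
                rcases List.mem_cons.mp hf with rfl | hf
                · exact c2 ⟨(i' + 1, j' + 1), true⟩ (by simp)
                · exact c2 f (by simp [hf])
            · rw [if_neg hlow]
              rw [if_neg hlow] at hkids0 hval0
              by_cases hup : PySem.Chars.isupper (al.getD i' ' ')
              · rw [if_pos hup]
                rw [if_pos hup] at hval0
                exact pop 0 hval0.symm
              · rw [if_neg hup]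
                rw [if_neg hup] at hkids0 hval0
                by_cases he : e
                · rw [dif_pos he]
                  refine pop _ ?_
                  rw [kidval he (i', j' + 1) (by rw [hkids0]; simp), hval0]
                · rw [dif_neg he]
                  have he' : e = false := by simpa using he
                  subst he'
                  have hcovS' : pvCover al bl
                      (((i', j' + 1), false) :: ((i' + 1, j' + 1), true) :: rest) μ.keys := by
                    refine ⟨by simp, ?_, ?_⟩
                    · intro _ c hc
                      rw [hkids0] at hc
                      rcases List.mem_singleton.mp hc with rfl
                      exact List.mem_cons_self ..
                    · exact pvCover_mono al bl rest _ _ hcrest (by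
                        intro x hx
                        rcases List.mem_cons.mp hx with rfl | hx
                        · exact List.mem_cons_self ..
                        · exact List.mem_cons_of_mem _ (List.mem_cons_of_mem _ hx))
                  obtain ⟨c1, c2, c3⟩ := IH _ (pvPhi_push1 (i' + 1) (j' + 1) (j' + 1) rest (Nat.succ_ne_zero i')) _ μ rfl hok hcovS'
                  refine ⟨c1, ?_, c3⟩
                  intro f hf
                  rcases List.mem_cons.mp hf with rfl | hf
                  · exact c2 ⟨(i' + 1, j' + 1), true⟩ (by simp)
                  · exact c2 f (by simp [hf])

theorem abbreviation_B_char (a b : String) :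
    abbreviation_alt a b =
      if pvVal a.toList b.toList a.toList.length b.toList.length ≠ 0 then "YES" else "NO" := by
  have hcov : pvCover a.toList b.toList
      [((a.toList.length, b.toList.length), false)]
      (PySem.Dict.empty : PySem.Dict (Nat × Nat) Int).keys :=
    ⟨by simp, trivial⟩
  have hok : pvMemoOK a.toList b.toList (PySem.Dict.empty : PySem.Dict (Nat × Nat) Int) := by
    intro p v h
    simp [PySem.Dict.empty, PySem.Dict.get?] at h
  obtain ⟨c1, c2, -⟩ := pvRun_main a.toList b.toList _
    [((a.toList.length, b.toList.length), false)] PySem.Dict.empty rfl hok hcov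
  have hmem : (a.toList.length, b.toList.length) ∈
      (pvRun a.toList b.toList [((a.toList.length, b.toList.length), false)]
        PySem.Dict.empty).keys :=
    c2 ((a.toList.length, b.toList.length), false) (List.mem_singleton.mpr rfl)
  have := pvGetD_of_mem a.toList b.toList _ _ c1 hmem
  show (if (pvRun a.toList b.toList [((a.toList.length, b.toList.length), false)]
        PySem.Dict.empty).getD (a.toList.length, b.toList.length) 0 ≠ 0
      then "YES" else "NO") = _
  rw [this]

-- ===== A side (unchanged from the table characterization) =====

def pvEntry (bl : List Char) (c : Char) (prev : List Int) (t : Nat) : Int :=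
  if c == bl.getD t ' ' then prev.getD t 0
  else if c == PySem.Chars.lowerChar (bl.getD t ' ') then
    max (prev.getD t 0) (prev.getD (t + 1) 0)
  else if PySem.Chars.isupper c then 0
  else prev.getD (t + 1) 0

def pvStep (bl : List Char) (c : Char) (prev : List Int) : List Int :=
  1 :: (List.range bl.length).map (pvEntry bl c prev)

def pvInit (m : Nat) : List Int := 1 :: List.replicate m 0

def pvRow (bl : List Char) (cs : List Char) : List Int :=
  cs.foldl (fun r c => pvStep bl c r) (pvInit bl.length)

theorem pv_getD_set_ne {a : Type} (l : List a) (i t : Nat) (v d : a) (h : t ≠ i) :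
    (l.set i v).getD t d = l.getD t d := by
  simp only [List.getD, List.getElem?_set, if_neg (Ne.symm h)]

theorem pv_getD_set_self {a : Type} (l : List a) (i : Nat) (v d : a) (h : i < l.length) :
    (l.set i v).getD i d = v := by
  simp [List.getD, h]

theorem pv_set_mapRange_replicate {a : Type} (f : Nat → a) (m t : Nat) (h : t < m) (d : a) :
    ((List.range t).map f ++ List.replicate (m - t) d).set t (f t)
      = (List.range (t + 1)).map f ++ List.replicate (m - (t + 1)) d := by
  rw [List.set_append_right _ _ (by simp), show m - t = (m - t - 1) + 1 from by omega,
    List.replicate_succ]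
  simp [List.range_succ]
  omega

def pvBodyA (al bl : List Char) (i : Int) (dp : List (List Int)) (j : Int) : List (List Int) :=
  let ai := PySem.List.pyGetD al (i - 1) ' '
  let bj := PySem.List.pyGetD bl (j - 1) ' '
  let v : Int :=
    if ai == bj then
      PySem.List.pyGetD (PySem.List.pyGetD dp (i - 1) []) (j - 1) 0
    else if ai == PySem.Chars.lowerChar bj then
      max (PySem.List.pyGetD (PySem.List.pyGetD dp (i - 1) []) (j - 1) 0)
          (PySem.List.pyGetD (PySem.List.pyGetD dp (i - 1) []) j 0)
    else if PySem.Chars.isupper ai then 0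
    else PySem.List.pyGetD (PySem.List.pyGetD dp (i - 1) []) j 0
  PySem.List.pySetD dp i (PySem.List.pySetD (PySem.List.pyGetD dp i []) j v)

theorem abbreviation_eq (a b : String) :
    abbreviation a b =
      (if PySem.List.pyGetD
            (PySem.List.pyGetD
              ((PySem.List.pyRange 1 ((a.toList.length : Int) + 1) 1).foldl
                (fun dp i =>
                  (PySem.List.pyRange 1 ((b.toList.length : Int) + 1) 1).foldl
                    (pvBodyA a.toList b.toList i) dp)
                ((PySem.List.pyRange 0 ((a.toList.length : Int) + 1) 1).map
                  (fun _ => 1 :: List.replicate b.toList.length (0 : Int))))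
              (a.toList.length : Int) [])
            (b.toList.length : Int) 0 ≠ 0
       then "YES" else "NO") := rfl

def pvPartial (bl : List Char) (c : Char) (prev : List Int) (t : Nat) : List Int :=
  1 :: ((List.range t).map (pvEntry bl c prev) ++ List.replicate (bl.length - t) 0)

theorem pvPartial_zero (bl : List Char) (c : Char) (prev : List Int) :
    pvPartial bl c prev 0 = pvInit bl.length := by simp [pvPartial, pvInit]

theorem pvPartial_last (bl : List Char) (c : Char) (prev : List Int) :
    pvPartial bl c prev bl.length = pvStep bl c prev := by simp [pvPartial, pvStep]

theorem pvInnerA (al bl : List Char) (i : Nat) (hi : 1 ≤ i) (dp : List (List Int))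
    (hlen : i < dp.length) (prev : List Int) (hprev : dp.getD (i - 1) [] = prev)
    (hcur : dp.getD i [] = pvInit bl.length) (t : Nat) (ht : t ≤ bl.length) :
    (PySem.List.pyRange 1 ((t : Int) + 1) 1).foldl (pvBodyA al bl (i : Int)) dp
      = dp.set i (pvPartial bl (al.getD (i - 1) ' ') prev t) := by
  induction t with
  | zero =>
    rw [show ((0 : Nat) : Int) + 1 = 1 from by norm_num, PySem.List.pyRange_one_eq_nil le_rfl,
      List.foldl_nil, pvPartial_zero, ← hcur, List.getD_eq_getElem _ _ hlen,
      List.set_getElem_self]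
  | succ t ih =>
    have ht' : t < bl.length := by omega
    rw [show ((t + 1 : Nat) : Int) + 1 = ((t : Int) + 1) + 1 from by push_cast; ring,
      PySem.List.pyRange_one_succ_right (by omega), List.foldl_append, ih (by omega)]
    simp only [List.foldl_cons, List.foldl_nil]
    unfold pvBodyA
    rw [show (i : Int) - 1 = ((i - 1 : Nat) : Int) from by omega]
    rw [show (t : Int) + 1 - 1 = ((t : Nat) : Int) from by ring]
    rw [show (t : Int) + 1 = ((t + 1 : Nat) : Int) from by push_cast; ring]
    simp only [PySem.List.pyGetD_natCast, PySem.List.pySetD_natCast]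
    rw [pv_getD_set_ne dp i (i - 1) _ [] (by omega), hprev,
      pv_getD_set_self dp i _ [] hlen, List.set_set]
    simp only [pvPartial, List.set_cons_succ]
    rw [← pv_set_mapRange_replicate (pvEntry bl (al.getD (i - 1) ' ') prev) bl.length t ht' 0]
    simp only [pvEntry]

def pvTable (al bl : List Char) (i : Nat) : List (List Int) :=
  (List.range (i + 1)).map (fun r => pvRow bl (al.take r)) ++
    List.replicate (al.length - i) (pvInit bl.length)

theorem pvTable_length (al bl : List Char) (i : Nat) (h : i ≤ al.length) :
    (pvTable al bl i).length = al.length + 1 := by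
  simp [pvTable]; omega

theorem pvTable_getD_le (al bl : List Char) (i r : Nat) (h : r ≤ i) :
    (pvTable al bl i).getD r [] = pvRow bl (al.take r) := by
  unfold pvTable
  rw [List.getD_append _ _ _ _ (by simp; omega)]
  exact PySem.List.getD_map_range _ _ _ _ (by omega)

theorem pvTable_getD_succ (al bl : List Char) (i : Nat) (h : i < al.length) :
    (pvTable al bl i).getD (i + 1) [] = pvInit bl.length := by
  unfold pvTable
  rw [List.getD_append_right _ _ _ _ (by simp),
    show al.length - i = (al.length - i - 1) + 1 from by omega, List.replicate_succ]
  simp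

theorem pvTable_zero (al bl : List Char) :
    ((PySem.List.pyRange 0 ((al.length : Int) + 1) 1).map
        (fun _ => 1 :: List.replicate bl.length (0 : Int)))
      = pvTable al bl 0 := by
  rw [List.map_const']
  unfold pvTable
  rw [List.range_one]
  simp [PySem.List.length_pyRange_one, pvRow, pvInit]
  rfl

theorem pvOuterA (al bl : List Char) (i : Nat) (hi : i ≤ al.length) :
    (PySem.List.pyRange 1 ((i : Int) + 1) 1).foldl
        (fun dp ii =>
          (PySem.List.pyRange 1 ((bl.length : Int) + 1) 1).foldl (pvBodyA al bl ii) dp)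
        ((PySem.List.pyRange 0 ((al.length : Int) + 1) 1).map
          (fun _ => 1 :: List.replicate bl.length (0 : Int)))
      = pvTable al bl i := by
  induction i with
  | zero =>
    rw [show ((0 : Nat) : Int) + 1 = 1 from by norm_num, PySem.List.pyRange_one_eq_nil le_rfl,
      List.foldl_nil, pvTable_zero]
  | succ i ih =>
    have hlt : i < al.length := by omega
    rw [show ((i + 1 : Nat) : Int) + 1 = ((i : Int) + 1) + 1 from by push_cast; ring,
      PySem.List.pyRange_one_succ_right (a := 1) (b := (i : Int) + 1) (by omega),
      List.foldl_append, ih (by omega)]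
    simp only [List.foldl_cons, List.foldl_nil]
    rw [show (i : Int) + 1 = ((i + 1 : Nat) : Int) from by push_cast; ring]
    rw [pvInnerA al bl (i + 1) (by omega) (pvTable al bl i)
      (by rw [pvTable_length al bl i (by omega)]; omega)
      (pvRow bl (al.take i))
      (by simpa using pvTable_getD_le al bl i i le_rfl)
      (pvTable_getD_succ al bl i hlt) bl.length le_rfl]
    rw [pvPartial_last]
    have htake : al.take (i + 1) = al.take i ++ [al.getD i ' '] := by
      rw [List.take_add_one]
      simp [List.getD, List.getElem?_eq_getElem hlt]
    have hstep : pvStep bl (al.getD ((i + 1) - 1) ' ') (pvRow bl (al.take i))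
        = pvRow bl (al.take (i + 1)) := by
      rw [htake]
      unfold pvRow
      rw [List.foldl_append]
      rfl
    rw [hstep]
    unfold pvTable
    rw [List.set_append_right _ _ (by simp),
      show i + 1 - ((List.range (i + 1)).map fun r => pvRow bl (al.take r)).length = 0 from by
        simp,
      show al.length - i = (al.length - (i + 1)) + 1 from by omega, List.replicate_succ,
      List.set_cons_zero]
    simp [List.range_succ]

theorem abbreviation_A_char (a b : String) :
    abbreviation a b =
      if (pvRow b.toList a.toList).getD b.toList.length 0 ≠ 0 then "YES" else "NO" := by
  rw [abbreviation_eq, pvOuterA a.toList b.toList a.toList.length le_rfl]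
  rw [show (a.toList.length : Int) = ((a.toList.length : Nat) : Int) from rfl,
    show (b.toList.length : Int) = ((b.toList.length : Nat) : Int) from rfl]
  simp only [PySem.List.pyGetD_natCast]
  rw [pvTable_getD_le a.toList b.toList a.toList.length a.toList.length le_rfl,
    List.take_length]

-- ===== pvVal equals A's row values =====

theorem pvStep_getD_zero (bl : List Char) (c : Char) (prev : List Int) :
    (pvStep bl c prev).getD 0 0 = 1 := rfl

theorem pvStep_getD_succ (bl : List Char) (c : Char) (prev : List Int) (t : Nat) :
    (pvStep bl c prev).getD (t + 1) 0 =
      if t < bl.length then pvEntry bl c prev t else 0 := by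
  rw [pvStep, List.getD_cons_succ]
  by_cases ht : t < bl.length
  · rw [PySem.List.getD_map_range _ _ _ _ ht, if_pos ht]
  · rw [if_neg ht, List.getD_eq_default]
    simpa using (by omega : bl.length ≤ t)

theorem pvVal_row (al bl : List Char) : ∀ (i : Nat), i ≤ al.length →
    ∀ j, j ≤ bl.length → pvVal al bl i j = (pvRow bl (al.take i)).getD j 0 := by
  intro i
  induction i with
  | zero =>
    intro _ j hj
    cases j with
    | zero => rfl
    | succ w =>
      show (0 : Int) = (pvInit bl.length).getD (w + 1) 0
      rw [pvInit, List.getD_cons_succ]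
      rcases Nat.lt_or_ge w bl.length with h | h
      · simp [List.getD, h]
      · rw [List.getD_eq_default _ _ (by simpa using h)]
  | succ i ih =>
    intro hi j hj
    have hlt : i < al.length := by omega
    have htake : al.take (i + 1) = al.take i ++ [al.getD i ' '] := by
      rw [List.take_add_one]
      simp [List.getD, List.getElem?_eq_getElem hlt]
    have hstep : pvRow bl (al.take (i + 1)) = pvStep bl (al.getD i ' ') (pvRow bl (al.take i)) := by
      rw [htake]
      unfold pvRow
      rw [List.foldl_append]
      rfl
    rw [hstep]
    cases j with
    | zero => rw [pvStep_getD_zero, pvVal_j_zero]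
    | succ w =>
      have hw : w < bl.length := by omega
      rw [pvStep_getD_succ, if_pos hw]
      have h1 := ih (by omega) w (by omega)
      have h2 := ih (by omega) (w + 1) (by omega)
      simp only [pvVal, pvEntry, Nat.add_sub_cancel, Nat.succ_ne_zero, if_false]
      split_ifs <;> simp [h1, h2]

-- ===== VERDICT (by name: the statement is the Claim_ definition above) =====
theorem abbreviation_spec : Claim_equal_abbreviation := by
  intro a b _
  unfold Spec_abbreviation
  rw [abbreviation_A_char, abbreviation_B_char,
    pvVal_row a.toList b.toList a.toList.length le_rfl b.toList.length le_rfl,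
    List.take_length]
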